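-- pv_equiv track=rewrite | github.com/UKPLab/coling2018-graph-neural-networks-question-answering | questionanswering/staged_generation.py | apply_grounding
-- ===== SOURCE A (Python) =====
-- import copy
--
-- def apply_grounding(g, grounding):
--     """
--     Given a grounding obtained from WikiData apply it to the graph.
--     Note: that the variable names returned by WikiData are important as they encode some grounding features.
--
--     :param g: a single ungrounded graph
--     :param grounding: a dictionary representing the grounding of relations and variables
--     :return: a grounded graph
--     >>> apply_grounding({'edgeSet':[{}]}, {'r0d':'P31v'}) == {'edgeSet': [{'type': 'direct', 'kbID': 'P31v'}]}
--     True
--     >>> apply_grounding({'edgeSet':[{}]}, {'r0v':'P31v'}) == {'edgeSet': [{'type': 'v-structure', 'kbID': 'P31v'}]}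
--     True
--     >>> apply_grounding({'edgeSet':[{}]}, {'r0v':'P31v', 'hopup0v':'P131v'}) == {'edgeSet': [{'type': 'v-structure', 'kbID': 'P31v', 'hopUp':'P131v'}]}
--     True
--     >>> apply_grounding({'edgeSet':[{}, {}]}, {'r1d':'P39v', 'r0v':'P31v', 'e20': 'Q18'}) == {'edgeSet': [{'type': 'v-structure', 'kbID': 'P31v', 'rightkbID': 'Q18'}, {'type': 'direct', 'kbID': 'P39v'}]}
--     True
--     >>> apply_grounding({'edgeSet':[]}, {})
--     {'edgeSet': []}
--     """
--     grounded = copy.deepcopy(g)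
--     for i, edge in enumerate(grounded.get('edgeSet', [])):
--         if "e2" + str(i) in grounding:
--             edge['rightkbID'] = grounding["e2" + str(i)]
--         if "hopup{}v".format(i) in grounding:
--             edge['hopUp'] = grounding["hopup{}v".format(i)]
--         if "r{}d".format(i) in grounding:
--             edge['kbID'] = grounding["r{}d".format(i)]
--             edge['type'] = 'direct'
--         elif "r{}r".format(i) in grounding:
--             edge['kbID'] = grounding["r{}r".format(i)]
--             edge['type'] = 'reverse'
--         elif "r{}v".format(i) in grounding:
--             edge['kbID'] = grounding["r{}v".format(i)]
--             edge['type'] = 'v-structure'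
--
--     return grounded
-- ===== SOURCE B (Python) =====
-- def apply_grounding(g, grounding):
--     """Index the grounding once by (kind, index-string) instead of formatting
--     candidate keys for every edge; shallow-copy instead of deepcopy."""
--     idx = {}
--     for k, v in grounding.items():
--         if k.startswith('e2'):
--             idx.setdefault(('e2', k[2:]), v)
--         elif k.startswith('hopup') and k.endswith('v'):
--             idx.setdefault(('hop', k[5:-1]), v)
--         elif k.startswith('r') and k.endswith('d'):
--             idx.setdefault(('d', k[1:-1]), v)
--         elif k.startswith('r') and k.endswith('r'):
--             idx.setdefault(('r', k[1:-1]), v)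
--         elif k.startswith('r') and k.endswith('v'):
--             idx.setdefault(('v', k[1:-1]), v)
--     grounded = dict(g)
--     new_edges = []
--     for i, edge in enumerate(grounded.get('edgeSet', [])):
--         e = dict(edge)
--         si = str(i)
--         if ('e2', si) in idx:
--             e['rightkbID'] = idx[('e2', si)]
--         if ('hop', si) in idx:
--             e['hopUp'] = idx[('hop', si)]
--         if ('d', si) in idx:
--             e['kbID'] = idx[('d', si)]
--             e['type'] = 'direct'
--         elif ('r', si) in idx:
--             e['kbID'] = idx[('r', si)]
--             e['type'] = 'reverse'
--         elif ('v', si) in idx: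
--             e['kbID'] = idx[('v', si)]
--             e['type'] = 'v-structure'
--         new_edges.append(e)
--     if 'edgeSet' in grounded:
--         grounded['edgeSet'] = new_edges
--     return grounded
-- ===== Notes on version B (the rewrite author's own statement) =====
-- stated objective: alternative
-- what changed: B makes one pass over grounding parsing each key's prefix/suffix into a (kind, index-string)-keyed index, then grounds every edge by direct index lookups (and uses shallow copies), instead of A's deepcopy plus formatting five candidate key strings per edge and testing each against the grounding dict.
import Mathlib
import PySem

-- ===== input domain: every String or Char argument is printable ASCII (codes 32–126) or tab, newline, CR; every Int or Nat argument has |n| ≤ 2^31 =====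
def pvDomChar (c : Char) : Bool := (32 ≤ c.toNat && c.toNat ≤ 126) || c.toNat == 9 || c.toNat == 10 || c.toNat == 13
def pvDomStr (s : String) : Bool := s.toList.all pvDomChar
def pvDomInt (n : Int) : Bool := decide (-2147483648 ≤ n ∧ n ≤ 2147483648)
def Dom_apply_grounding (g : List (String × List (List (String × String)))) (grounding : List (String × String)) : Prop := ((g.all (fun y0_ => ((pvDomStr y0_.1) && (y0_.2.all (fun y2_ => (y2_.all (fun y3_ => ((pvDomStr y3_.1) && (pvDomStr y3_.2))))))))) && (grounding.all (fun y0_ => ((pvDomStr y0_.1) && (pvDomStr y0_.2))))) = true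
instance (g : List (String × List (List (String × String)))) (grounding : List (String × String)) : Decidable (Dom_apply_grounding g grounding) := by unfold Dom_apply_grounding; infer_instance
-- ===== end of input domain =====

-- B indexes the grounding once by (kind, index-string) parsed from each key, instead of
-- formatting five candidate keys per edge as A does; objective: alternative decomposition.
-- Both ports treat the Python dicts as PySem.Dict built from the association lists.

-- ===== PORT A =====
-- per-edge body of A's loop: the three if/elif chains, looking up formatted keys in grounding
def pvGroundEdgeA (gr : PySem.Dict String String) (i : Int) (e : List (String × String)) :
    List (String × String) :=
  let si := PySem.Int.toStr i
  let ed := PySem.Dict.ofList e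
  let ed := match gr.get? ("e2" ++ si) with
    | some v => ed.insert "rightkbID" v
    | none => ed
  let ed := match gr.get? ("hopup" ++ si ++ "v") with
    | some v => ed.insert "hopUp" v
    | none => ed
  let ed := match gr.get? ("r" ++ si ++ "d") with
    | some v => (ed.insert "kbID" v).insert "type" "direct"
    | none => match gr.get? ("r" ++ si ++ "r") with
      | some v => (ed.insert "kbID" v).insert "type" "reverse"
      | none => match gr.get? ("r" ++ si ++ "v") with
        | some v => (ed.insert "kbID" v).insert "type" "v-structure"
        | none => ed
  ed.items

def apply_grounding (g : List (String × List (List (String × String)))) (grounding : List (String × String)) : List (String × List (List (String × String))) :=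
  let gd := PySem.Dict.ofList g
  let gr := PySem.Dict.ofList grounding
  let edges' := (PySem.List.enumerate (gd.getD "edgeSet" []) 0).map
    (fun p => pvGroundEdgeA gr p.1 p.2)
  -- A mutates the edge list held under 'edgeSet' in place: the key's value changes only
  -- when the key is present (when absent the loop runs over [] and nothing changes)
  if gd.contains "edgeSet" then (gd.insert "edgeSet" edges').items else gd.items

-- ===== PORT B =====
-- k.startswith/endswith and the slices k[2:], k[5:-1], k[1:-1] of Source B
def pvClassify (k : String) : Option (String × String) :=
  if PySem.Str.startswith k "e2" then
    some ("e2", String.ofList (PySem.List.slice k.toList (some 2) none))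
  else if PySem.Str.startswith k "hopup" && PySem.Str.endswith k "v" then
    some ("hop", String.ofList (PySem.List.slice k.toList (some 5) (some (-1))))
  else if PySem.Str.startswith k "r" && PySem.Str.endswith k "d" then
    some ("d", String.ofList (PySem.List.slice k.toList (some 1) (some (-1))))
  else if PySem.Str.startswith k "r" && PySem.Str.endswith k "r" then
    some ("r", String.ofList (PySem.List.slice k.toList (some 1) (some (-1))))
  else if PySem.Str.startswith k "r" && PySem.Str.endswith k "v" then
    some ("v", String.ofList (PySem.List.slice k.toList (some 1) (some (-1))))
  else none

-- Source B's first loop: one pass over grounding.items() building idx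
def pvIndex (gr : PySem.Dict String String) : PySem.Dict (String × String) String :=
  gr.items.foldl
    (fun d kv => match pvClassify kv.1 with
      | some key => d.setdefault key kv.2
      | none => d)
    PySem.Dict.empty

-- per-edge body of Source B's second loop: constant-key lookups in idx
def pvGroundEdgeB (idx : PySem.Dict (String × String) String) (i : Int) (e : List (String × String)) :
    List (String × String) :=
  let si := PySem.Int.toStr i
  let ed := PySem.Dict.ofList e
  let ed := match idx.get? ("e2", si) with
    | some v => ed.insert "rightkbID" v
    | none => ed
  let ed := match idx.get? ("hop", si) with
    | some v => ed.insert "hopUp" v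
    | none => ed
  let ed := match idx.get? ("d", si) with
    | some v => (ed.insert "kbID" v).insert "type" "direct"
    | none => match idx.get? ("r", si) with
      | some v => (ed.insert "kbID" v).insert "type" "reverse"
      | none => match idx.get? ("v", si) with
        | some v => (ed.insert "kbID" v).insert "type" "v-structure"
        | none => ed
  ed.items

def apply_grounding_alt (g : List (String × List (List (String × String)))) (grounding : List (String × String)) : List (String × List (List (String × String))) :=
  let gd := PySem.Dict.ofList g
  let idx := pvIndex (PySem.Dict.ofList grounding)
  let edges' := (PySem.List.enumerate (gd.getD "edgeSet" []) 0).map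
    (fun p => pvGroundEdgeB idx p.1 p.2)
  if gd.contains "edgeSet" then (gd.insert "edgeSet" edges').items else gd.items

-- ===== PRECONDITION & SPEC =====
def Spec_apply_grounding (g : List (String × List (List (String × String)))) (grounding : List (String × String)) (out : List (String × List (List (String × String)))) : Prop := out = apply_grounding_alt g grounding
instance (g : List (String × List (List (String × String)))) (grounding : List (String × String)) (out : List (String × List (List (String × String)))) : Decidable (Spec_apply_grounding g grounding out) := by unfold Spec_apply_grounding; infer_instance

-- ===== CLAIM (what is proved, stated in full; the proofs are below) =====
def Claim_equal_apply_grounding : Prop := ∀ (g : List (String × List (List (String × String)))) (grounding : List (String × String)), Dom_apply_grounding g grounding → Spec_apply_grounding g grounding (apply_grounding g grounding)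

-- ===== LEMMAS AND PROOFS =====

-- the grounding key that A consults for a given kind and index-string, as B's pvClassify parses it
def pvWrap (tag si : String) : String :=
  if tag = "e2" then "e2" ++ si
  else if tag = "hop" then "hopup" ++ si ++ "v"
  else "r" ++ si ++ tag

def pvTagOK (tag : String) : Prop :=
  tag = "e2" ∨ tag = "hop" ∨ tag = "d" ∨ tag = "r" ∨ tag = "v"

lemma pvToDigitsCore_ne_nil (b : Nat) : ∀ (fuel n : Nat) (ds : List Char), ds ≠ [] → Nat.toDigitsCore b fuel n ds ≠ [] := by
  intro fuel
  induction fuel with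
  | zero => intro n ds h; simpa [Nat.toDigitsCore] using h
  | succ f ih =>
    intro n ds h
    rw [Nat.toDigitsCore]
    split
    · simp
    · exact ih _ _ (by simp)

lemma pvToChars_ne_nil (n : Int) : PySem.Int.toChars n ≠ [] := by
  have hd : ∀ m : Nat, Nat.toDigits 10 m ≠ [] := by
    intro m
    rw [Nat.toDigits, Nat.toDigitsCore]
    split
    · simp
    · exact pvToDigitsCore_ne_nil _ _ _ _ (by simp)
  unfold PySem.Int.toChars
  split
  · simp
  · exact hd _

lemma pvClassify_wrap (tag si : String) (htag : pvTagOK tag) (_hsi : si.toList ≠ []) :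
    pvClassify (pvWrap tag si) = some (tag, si) := by
  rcases htag with rfl | rfl | rfl | rfl | rfl
  · have hw : pvWrap "e2" si = "e2" ++ si := by simp [pvWrap]
    rw [hw]
    simp [pvClassify, PySem.Str.startswith, PySem.Chars.startswith, String.toList_append,
      List.isPrefixOf, PySem.List.slice, PySem.List.clampIdx]
    rw [← String.length_toList, List.take_length, String.ofList_toList]
  · have hw : pvWrap "hop" si = "hopup" ++ si ++ "v" := by simp [pvWrap]
    rw [hw]
    simp [pvClassify, PySem.Str.startswith, PySem.Chars.startswith, PySem.Str.endswith,
      PySem.Chars.endswith, String.toList_append, List.isPrefixOf, List.isSuffixOf,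
      PySem.List.slice, PySem.List.clampIdx]
    rw [if_neg (by omega)]
    rw [show ((si.length:Int)+1+1+1+1+1).toNat - 5 = si.toList.length from by
          rw [String.length_toList]; omega]
    rw [List.take_left, String.ofList_toList]
  · have hw : pvWrap "d" si = "r" ++ si ++ "d" := by simp [pvWrap]
    rw [hw]
    simp [pvClassify, PySem.Str.startswith, PySem.Chars.startswith, PySem.Str.endswith,
      PySem.Chars.endswith, String.toList_append, List.isPrefixOf, List.isSuffixOf,
      PySem.List.slice, PySem.List.clampIdx]
    rw [if_neg (by omega)]
    rw [show si.length + 1 - 1 = si.toList.length from by rw [String.length_toList]; omega]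
    rw [List.take_left, String.ofList_toList]
  · have hw : pvWrap "r" si = "r" ++ si ++ "r" := by simp [pvWrap]
    rw [hw]
    simp [pvClassify, PySem.Str.startswith, PySem.Chars.startswith, PySem.Str.endswith,
      PySem.Chars.endswith, String.toList_append, List.isPrefixOf, List.isSuffixOf,
      PySem.List.slice, PySem.List.clampIdx]
    rw [if_neg (by omega)]
    rw [show si.length + 1 - 1 = si.toList.length from by rw [String.length_toList]; omega]
    rw [List.take_left, String.ofList_toList]
  · have hw : pvWrap "v" si = "r" ++ si ++ "v" := by simp [pvWrap]
    rw [hw]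
    simp [pvClassify, PySem.Str.startswith, PySem.Chars.startswith, PySem.Str.endswith,
      PySem.Chars.endswith, String.toList_append, List.isPrefixOf, List.isSuffixOf,
      PySem.List.slice, PySem.List.clampIdx]
    rw [if_neg (by omega)]
    rw [show si.length + 1 - 1 = si.toList.length from by rw [String.length_toList]; omega]
    rw [List.take_left, String.ofList_toList]

lemma pvSplitTail {pre t l : List Char} {x : Char} (h : pre ++ t = l)
    (hs : ∃ u, u ++ [x] = l) (ht : t ≠ []) : ∃ m, t = m ++ [x] := by
  obtain ⟨u, hu⟩ := hs
  have hlen : pre.length + t.length = u.length + 1 := by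
    have := congrArg List.length (h.trans hu.symm)
    simpa using this
  have hle : pre.length ≤ u.length := by
    have : t.length ≠ 0 := fun h0 => ht (List.length_eq_zero_iff.mp h0)
    omega
  have heq : pre ++ t = u.take pre.length ++ (u.drop pre.length ++ [x]) := by
    rw [← List.append_assoc, List.take_append_drop]
    exact h.trans hu.symm
  have hlen2 : pre.length = (u.take pre.length).length := by
    simp [hle]
  obtain ⟨-, h2⟩ := List.append_inj heq hlen2
  exact ⟨u.drop pre.length, h2⟩

lemma pvSliceE2 (m : List Char) : PySem.List.slice ('e'::'2'::m) (some 2) none = m := by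
  simp [PySem.List.slice, PySem.List.clampIdx]

lemma pvSliceR (m : List Char) (x : Char) :
    PySem.List.slice ('r'::(m++[x])) (some 1) (some (-1)) = m := by
  simp [PySem.List.slice, PySem.List.clampIdx]
  rw [if_neg (by omega)]
  simp

lemma pvSliceH (m : List Char) (x : Char) :
    PySem.List.slice ('h'::'o'::'p'::'u'::'p'::(m++[x])) (some 5) (some (-1)) = m := by
  simp [PySem.List.slice, PySem.List.clampIdx]
  rw [if_neg (by omega)]
  rw [show ((m.length:Int)+1+1+1+1+1).toNat - 5 = m.length from by omega]
  exact List.take_left ..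

lemma pvLastNe {u l : List Char} {x y : Char} (hu : u ++ [x] = l)
    (hl : l.getLast? = some y) (hne : x ≠ y) : False := by
  rw [← hu] at hl
  rw [List.getLast?_concat] at hl
  exact hne (Option.some_inj.mp hl)

lemma pvClassify_inv (k tag si : String) (htag : pvTagOK tag) (hsi : si.toList ≠ [])
    (h : pvClassify k = some (tag, si)) : k = pvWrap tag si := by
  unfold pvClassify at h
  split_ifs at h with c1 c2 c3 c4 c5
  · -- e2 branch
    injection h with h'
    obtain ⟨h1, h2⟩ := Prod.mk.inj h'
    subst h1; subst h2
    obtain ⟨t, ht⟩ := List.isPrefixOf_iff_prefix.mp c1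
    apply String.toList_inj.mp
    rw [show pvWrap "e2" (String.ofList (PySem.List.slice k.toList (some 2) none))
        = "e2" ++ String.ofList (PySem.List.slice k.toList (some 2) none) from by simp [pvWrap]]
    rw [String.toList_append, ← ht]
    simp [pvSliceE2]
  · -- hop branch
    injection h with h'
    obtain ⟨h1, h2⟩ := Prod.mk.inj h'
    subst h1; subst h2
    obtain ⟨hpre, hsuf⟩ := (Bool.and_eq_true _ _).mp c2
    obtain ⟨t, ht⟩ := List.isPrefixOf_iff_prefix.mp hpre
    obtain ⟨u, hu⟩ := (PySem.Chars.endswith_iff k.toList ("v":String).toList).mp hsuf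
    rw [show ("v":String).toList = ['v'] from rfl] at hu
    rw [show ("hopup":String).toList = ['h','o','p','u','p'] from rfl] at ht
    have ht0 : t ≠ [] := by
      rintro rfl
      rw [List.append_nil] at ht
      exact pvLastNe hu (by rw [← ht]; rfl) (by decide)
    obtain ⟨m, hm⟩ := pvSplitTail ht ⟨u, hu⟩ ht0
    subst hm
    apply String.toList_inj.mp
    rw [show pvWrap "hop" (String.ofList (PySem.List.slice k.toList (some 5) (some (-1))))
        = "hopup" ++ String.ofList (PySem.List.slice k.toList (some 5) (some (-1))) ++ "v" from by
          simp [pvWrap]]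
    rw [String.toList_append, String.toList_append, ← ht]
    simp [pvSliceH]
  · -- direct branch
    injection h with h'
    obtain ⟨h1, h2⟩ := Prod.mk.inj h'
    subst h1; subst h2
    obtain ⟨hpre, hsuf⟩ := (Bool.and_eq_true _ _).mp c3
    obtain ⟨t, ht⟩ := List.isPrefixOf_iff_prefix.mp hpre
    obtain ⟨u, hu⟩ := (PySem.Chars.endswith_iff k.toList ("d":String).toList).mp hsuf
    rw [show ("d":String).toList = ['d'] from rfl] at hu
    rw [show ("r":String).toList = ['r'] from rfl] at ht
    have ht0 : t ≠ [] := by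
      rintro rfl
      rw [List.append_nil] at ht
      exact pvLastNe hu (by rw [← ht]; rfl) (by decide)
    obtain ⟨m, hm⟩ := pvSplitTail ht ⟨u, hu⟩ ht0
    subst hm
    apply String.toList_inj.mp
    rw [show pvWrap "d" (String.ofList (PySem.List.slice k.toList (some 1) (some (-1))))
        = "r" ++ String.ofList (PySem.List.slice k.toList (some 1) (some (-1))) ++ "d" from by
          simp [pvWrap]]
    rw [String.toList_append, String.toList_append, ← ht]
    simp [pvSliceR]
  · -- reverse branch
    injection h with h'
    obtain ⟨h1, h2⟩ := Prod.mk.inj h'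
    subst h1; subst h2
    obtain ⟨hpre, hsuf⟩ := (Bool.and_eq_true _ _).mp c4
    obtain ⟨t, ht⟩ := List.isPrefixOf_iff_prefix.mp hpre
    obtain ⟨u, hu⟩ := (PySem.Chars.endswith_iff k.toList ("r":String).toList).mp hsuf
    rw [show ("r":String).toList = ['r'] from rfl] at hu ht
    have ht0 : t ≠ [] := by
      rintro rfl
      rw [List.append_nil] at ht
      apply hsi
      rw [← ht]
      rfl
    obtain ⟨m, hm⟩ := pvSplitTail ht ⟨u, hu⟩ ht0
    subst hm
    apply String.toList_inj.mp
    rw [show pvWrap "r" (String.ofList (PySem.List.slice k.toList (some 1) (some (-1))))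
        = "r" ++ String.ofList (PySem.List.slice k.toList (some 1) (some (-1))) ++ "r" from by
          simp [pvWrap]]
    rw [String.toList_append, String.toList_append, ← ht]
    simp [pvSliceR]
  · -- v-structure branch
    injection h with h'
    obtain ⟨h1, h2⟩ := Prod.mk.inj h'
    subst h1; subst h2
    obtain ⟨hpre, hsuf⟩ := (Bool.and_eq_true _ _).mp c5
    obtain ⟨t, ht⟩ := List.isPrefixOf_iff_prefix.mp hpre
    obtain ⟨u, hu⟩ := (PySem.Chars.endswith_iff k.toList ("v":String).toList).mp hsuf
    rw [show ("v":String).toList = ['v'] from rfl] at hu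
    rw [show ("r":String).toList = ['r'] from rfl] at ht
    have ht0 : t ≠ [] := by
      rintro rfl
      rw [List.append_nil] at ht
      exact pvLastNe hu (by rw [← ht]; rfl) (by decide)
    obtain ⟨m, hm⟩ := pvSplitTail ht ⟨u, hu⟩ ht0
    subst hm
    apply String.toList_inj.mp
    rw [show pvWrap "v" (String.ofList (PySem.List.slice k.toList (some 1) (some (-1))))
        = "r" ++ String.ofList (PySem.List.slice k.toList (some 1) (some (-1))) ++ "v" from by
          simp [pvWrap]]
    rw [String.toList_append, String.toList_append, ← ht]
    simp [pvSliceR]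


lemma pvIndex_fold (tag si : String) (htag : pvTagOK tag) (hsi : si.toList ≠ [])
    (L : List (String × String)) (d0 : PySem.Dict (String × String) String) :
    (L.foldl (fun d kv => match pvClassify kv.1 with
        | some key => d.setdefault key kv.2
        | none => d) d0).get? (tag, si)
      = (d0.get? (tag, si)).or ((L.find? (fun p => p.1 == pvWrap tag si)).map (·.2)) := by
  induction L generalizing d0 with
  | nil => simp
  | cons kv L ih =>
    obtain ⟨k, v⟩ := kv
    by_cases hk : k = pvWrap tag si
    · subst hk
      simp only [List.foldl_cons, List.find?_cons, BEq.rfl]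
      rw [ih, pvClassify_wrap tag si htag hsi]
      show ((d0.setdefault (tag, si) v).get? (tag, si)).or _ = _
      rw [PySem.Dict.get?_setdefault_self]
      rcases d0.get? (tag, si) with _ | w <;> simp
    · simp only [List.foldl_cons, List.find?_cons]
      have hbeq : (k == pvWrap tag si) = false := by simpa using hk
      rw [hbeq]
      simp only []
      cases hc : pvClassify k with
      | none => rw [ih]
      | some key =>
        rw [ih]
        have hkey : (tag, si) ≠ key := by
          rintro rfl
          exact hk (pvClassify_inv k tag si htag hsi hc)
        show ((d0.setdefault key v).get? (tag, si)).or _ = _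
        rw [PySem.Dict.get?_setdefault_of_ne _ _ hkey]

lemma pvIndex_get (gr : PySem.Dict String String) (tag si : String)
    (htag : pvTagOK tag) (hsi : si.toList ≠ []) :
    (pvIndex gr).get? (tag, si) = gr.get? (pvWrap tag si) := by
  unfold pvIndex
  rw [pvIndex_fold tag si htag hsi]
  rw [show (PySem.Dict.empty : PySem.Dict (String × String) String).get? (tag, si) = none from rfl]
  rw [Option.none_or]
  rfl

lemma pvGroundEdge_eq (gr : PySem.Dict String String) (i : Int) (e : List (String × String)) :
    pvGroundEdgeA gr i e = pvGroundEdgeB (pvIndex gr) i e := by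
  have hsi : (PySem.Int.toStr i).toList ≠ [] := by
    rw [PySem.Int.toList_toStr]
    exact pvToChars_ne_nil i
  unfold pvGroundEdgeA pvGroundEdgeB
  simp only []
  rw [pvIndex_get gr "e2" _ (Or.inl rfl) hsi,
      pvIndex_get gr "hop" _ (Or.inr (Or.inl rfl)) hsi,
      pvIndex_get gr "d" _ (Or.inr (Or.inr (Or.inl rfl))) hsi,
      pvIndex_get gr "r" _ (Or.inr (Or.inr (Or.inr (Or.inl rfl)))) hsi,
      pvIndex_get gr "v" _ (Or.inr (Or.inr (Or.inr (Or.inr rfl)))) hsi]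
  rw [show pvWrap "e2" (PySem.Int.toStr i) = "e2" ++ PySem.Int.toStr i from by simp [pvWrap],
      show pvWrap "hop" (PySem.Int.toStr i) = "hopup" ++ PySem.Int.toStr i ++ "v" from by simp [pvWrap],
      show pvWrap "d" (PySem.Int.toStr i) = "r" ++ PySem.Int.toStr i ++ "d" from by simp [pvWrap],
      show pvWrap "r" (PySem.Int.toStr i) = "r" ++ PySem.Int.toStr i ++ "r" from by simp [pvWrap],
      show pvWrap "v" (PySem.Int.toStr i) = "r" ++ PySem.Int.toStr i ++ "v" from by simp [pvWrap]]

-- ===== VERDICT (by name: the statement is the Claim_ definition above) =====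
theorem apply_grounding_spec : Claim_equal_apply_grounding := by
  intro g grounding _
  unfold Spec_apply_grounding apply_grounding apply_grounding_alt
  have h : ∀ p : Int × List (String × String),
      pvGroundEdgeA (PySem.Dict.ofList grounding) p.1 p.2
        = pvGroundEdgeB (pvIndex (PySem.Dict.ofList grounding)) p.1 p.2 :=
    fun p => pvGroundEdge_eq _ p.1 p.2
  simp only [h]
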